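-- pv_equiv track=rewrite | github.com/pabloschwarzenberg/grader | hito2_ej4/hito2_ej4_3e5d117fb30d515bd796b747dc5ca48b.py | descuentos
-- ===== SOURCE A (Python) =====
-- def descuentos(carrito_de_compras):
--     if all(carrito_de_compras.count(j)>=1 for j in [1,2,3]):
--         if all(carrito_de_compras.count(l)>=1 for l in [4,5]):
--             return 3 #ambos descuentos
--         else:
--             return 1 #solo descuento 1
--     else:
--         if all(carrito_de_compras.count(l) >= 1 for l in [4, 5]):
--             return 2 #solo descuento 2
--         else:
--             return 0 #ninguno descuento
-- ===== SOURCE B (Python) =====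
-- def descuentos(carrito_de_compras):
--     faltan1 = {1, 2, 3}
--     faltan2 = {4, 5}
--     for x in carrito_de_compras:
--         faltan1.discard(x)
--         faltan2.discard(x)
--     return (1 if not faltan1 else 0) + (2 if not faltan2 else 0)
-- ===== Notes on version B (the rewrite author's own statement) =====
-- stated objective: alternative
-- what changed: Replaces A's five count() scans inside a nested 4-way if/else with a single pass over the cart that discards seen items from two 'still missing' sets, then returns 1*[faltan1 empty] + 2*[faltan2 empty].
import Mathlib
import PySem

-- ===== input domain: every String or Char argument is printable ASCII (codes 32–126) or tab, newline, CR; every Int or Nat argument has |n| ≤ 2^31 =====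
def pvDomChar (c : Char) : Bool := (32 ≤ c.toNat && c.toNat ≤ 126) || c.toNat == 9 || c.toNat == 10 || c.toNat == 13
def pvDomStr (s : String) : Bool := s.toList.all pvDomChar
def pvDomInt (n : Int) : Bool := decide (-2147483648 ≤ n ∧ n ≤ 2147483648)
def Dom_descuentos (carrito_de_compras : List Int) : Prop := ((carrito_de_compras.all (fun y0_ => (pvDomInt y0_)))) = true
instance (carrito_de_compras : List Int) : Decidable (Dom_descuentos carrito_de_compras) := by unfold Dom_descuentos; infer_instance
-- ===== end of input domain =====

-- B replaces A's five count() scans and nested branch tree by one pass that discards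
-- seen items from two "still missing" sets and scores their final emptiness (alternative).

-- ===== PORT A =====
def descuentos (carrito_de_compras : List Int) : Int :=
  if ([1, 2, 3] : List Int).all (fun j => PySem.List.count carrito_de_compras j ≥ 1) then
    if ([4, 5] : List Int).all (fun l => PySem.List.count carrito_de_compras l ≥ 1) then
      3
    else
      1
  else
    if ([4, 5] : List Int).all (fun l => PySem.List.count carrito_de_compras l ≥ 1) then
      2
    else
      0

-- ===== PORT B =====
def descuentos_alt (carrito_de_compras : List Int) : Int :=
  let r := carrito_de_compras.foldl
    (fun s x => (PySem.Set.discard s.1 x, PySem.Set.discard s.2 x))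
    ((PySem.Set.ofList ([1, 2, 3] : List Int)), (PySem.Set.ofList ([4, 5] : List Int)))
  (if r.1.isEmpty then 1 else 0) + (if r.2.isEmpty then 2 else 0)

-- ===== PRECONDITION & SPEC =====
def Spec_descuentos (carrito_de_compras : List Int) (out : Int) : Prop := out = descuentos_alt carrito_de_compras
instance (carrito_de_compras : List Int) (out : Int) : Decidable (Spec_descuentos carrito_de_compras out) := by unfold Spec_descuentos; infer_instance

-- ===== CLAIM =====
def Claim_equal_descuentos : Prop := ∀ (carrito_de_compras : List Int), Dom_descuentos carrito_de_compras → Spec_descuentos carrito_de_compras (descuentos carrito_de_compras)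

-- ===== LEMMAS AND PROOFS =====
theorem mem_foldl_discard (xs : List Int) (s : PySem.Set Int) (a : Int) :
    a ∈ xs.foldl PySem.Set.discard s ↔ a ∈ s ∧ a ∉ xs := by
  induction xs generalizing s with
  | nil => simp
  | cons x t ih =>
    simp [List.foldl_cons, ih, PySem.Set.mem_discard]
    tauto

-- ===== VERDICT =====
theorem descuentos_spec : Claim_equal_descuentos := by
  intro xs _
  unfold Spec_descuentos descuentos descuentos_alt
  rw [PySem.List.foldl_prod_mk (f := fun t x => PySem.Set.discard t x)
      (g := fun t x => PySem.Set.discard t x)]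
  simp only [List.all_cons, List.all_nil, List.isEmpty_iff,
    List.eq_nil_iff_forall_not_mem, mem_foldl_discard, PySem.List.count_eq,
    Bool.and_true, Bool.and_eq_true, decide_eq_true_eq, ge_iff_le]
  have hmem : ∀ v : Int, (1 : Int) ≤ (xs.count v : Int) ↔ v ∈ xs := by
    intro v
    rw [Int.toNat_le.symm]
    simp [Nat.one_le_iff_ne_zero, List.count_eq_zero]
  by_cases h1 : (1:Int) ∈ xs <;> by_cases h2 : (2:Int) ∈ xs <;>
    by_cases h3 : (3:Int) ∈ xs <;> by_cases h4 : (4:Int) ∈ xs <;>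
    by_cases h5 : (5:Int) ∈ xs <;>
    simp_all [List.eq_nil_iff_forall_not_mem, mem_foldl_discard]
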